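-- pv_equiv track=rewrite | github.com/Jarabi/fundamental-coding-interview-prep | 02-simple-looping-with-python/07-consecutive_equal_digits.py | solution
-- ===== SOURCE A (Python) =====
-- def solution(n: int) -> int:
--     consecutive_count = 0
--     current = None
--
--     while n > 0:
--         digit = n % 10;
--
--         if digit == current:
--             consecutive_count += 1
--         else:
--             current = digit
--         n //= 10
--
--     return consecutive_count
-- ===== SOURCE B (Python) =====
-- def solution(n: int) -> int:
--     # Position k and k+1 hold equal digits exactly when the two-digit chunk
--     # (n // 10**k) % 100 is a multiple of 11.  Count those chunks directly.
--     if n <= 0: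
--         return 0
--     return sum(1 for k in range(len(str(n)) - 1) if (n // 10 ** k) % 100 % 11 == 0)
-- ===== Notes on version B (the rewrite author's own statement) =====
-- stated objective: alternative
-- what changed: A extracts digits one by one in a while-loop carrying a 'current previous digit' state and an accumulator; B has no state at all: it tests each digit position k directly with the arithmetic fact that digits k and k+1 are equal exactly when (n // 10**k) % 100 is a multiple of 11, and sums the matches over range(len(str(n)) - 1).
import Mathlib
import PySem

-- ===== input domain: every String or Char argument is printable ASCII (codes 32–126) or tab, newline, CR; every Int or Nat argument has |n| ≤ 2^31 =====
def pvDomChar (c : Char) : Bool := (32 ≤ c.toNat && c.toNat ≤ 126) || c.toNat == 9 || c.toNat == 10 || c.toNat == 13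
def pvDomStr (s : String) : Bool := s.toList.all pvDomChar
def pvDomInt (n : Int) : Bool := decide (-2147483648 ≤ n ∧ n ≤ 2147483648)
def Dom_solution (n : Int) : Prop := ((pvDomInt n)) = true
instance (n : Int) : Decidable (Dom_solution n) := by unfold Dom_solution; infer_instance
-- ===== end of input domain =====

-- B replaces A's stateful digit-extraction loop by a direct arithmetic test per digit position
-- (digits k and k+1 are equal iff (n // 10^k) % 100 is a multiple of 11); objective: alternative.

-- ===== PORT A =====
-- while n > 0: digit = n % 10; if digit == current: count += 1 else: current = digit; n //= 10
def loopA (n : Int) (current : Option Int) (acc : Int) : Int :=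
  if 0 < n then
    let digit := PySem.Int.mod n 10
    if some digit = current then
      loopA (PySem.Int.floordiv n 10) current (acc + 1)
    else
      loopA (PySem.Int.floordiv n 10) (some digit) acc
  else acc
termination_by n.toNat
decreasing_by
  all_goals
    rw [PySem.Int.floordiv_eq_ediv_of_pos (by norm_num : (0:Int) < 10)]
    omega

def solution (n : Int) : Int := loopA n none 0

-- ===== PORT B =====
-- if n <= 0: return 0
-- return sum(1 for k in range(len(str(n)) - 1) if (n // 10 ** k) % 100 % 11 == 0)
-- (the exponent k drawn from range(…) is nonnegative, so 10 ** k is ported as 10 ^ k.toNat — exact there)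
def solution_alt (n : Int) : Int :=
  if n ≤ 0 then 0
  else
    ((PySem.List.pyRange 0 (PySem.Str.len (PySem.Int.toStr n) - 1) 1).map (fun k =>
        if PySem.Int.mod (PySem.Int.mod (PySem.Int.floordiv n ((10 : Int) ^ k.toNat)) 100) 11 = 0
        then (1 : Int) else 0)).sum

-- ===== PRECONDITION & SPEC =====
def Spec_solution (n : Int) (out : Int) : Prop := out = solution_alt n
instance (n : Int) (out : Int) : Decidable (Spec_solution n out) := by unfold Spec_solution; infer_instance

-- ===== CLAIM (what is proved, stated in full; the proofs are below) =====
def Claim_equal_solution : Prop := ∀ (n : Int), Dom_solution n → Spec_solution n (solution n)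

-- ===== LEMMAS AND PROOFS =====

-- A's loop, expressed over the LSB-first digit list
def pairsW (cur : Option Int) : List ℕ → Int
  | [] => 0
  | d :: t => if some ((d : Int)) = cur then 1 + pairsW cur t else pairsW (some (d : Int)) t

-- adjacent-equal pair count of a digit list
def pairs : List ℕ → Int
  | a :: b :: t => (if a = b then 1 else 0) + pairs (b :: t)
  | _ => 0

lemma loopA_digits (m : ℕ) : ∀ (cur : Option Int) (acc : Int),
    loopA (m : Int) cur acc = acc + pairsW cur (Nat.digits 10 m) := by
  induction m using Nat.strong_induction_on with
  | _ m ih =>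
    intro cur acc
    rw [loopA]
    by_cases hm : 0 < m
    · have hpos : (0 : Int) < (m : Int) := by exact_mod_cast hm
      rw [if_pos hpos]
      have hmod : PySem.Int.mod (m : Int) 10 = ((m % 10 : ℕ) : Int) :=
        PySem.Int.mod_natCast m 10
      have hdiv : PySem.Int.floordiv (m : Int) 10 = ((m / 10 : ℕ) : Int) :=
        PySem.Int.floordiv_natCast m 10
      have hdig : Nat.digits 10 m = m % 10 :: Nat.digits 10 (m / 10) :=
        Nat.digits_def' (by norm_num) hm
      have hlt : m / 10 < m := Nat.div_lt_self hm (by norm_num)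
      rw [hdig]
      simp only [hmod, hdiv, pairsW]
      by_cases hc : some ((m % 10 : ℕ) : Int) = cur
      · rw [if_pos hc, if_pos hc, ih _ hlt]; ring
      · rw [if_neg hc, if_neg hc, ih _ hlt]
    · have : ¬ (0 : Int) < (m : Int) := by exact_mod_cast hm
      rw [if_neg this]
      have : m = 0 := by omega
      subst this
      simp [pairsW]

lemma pairsW_some (t : List ℕ) : ∀ a : ℕ, pairsW (some (a : Int)) t = pairs (a :: t) := by
  induction t with
  | nil => intro a; simp [pairsW, pairs]
  | cons d t ih =>
    intro a
    simp only [pairsW, pairs]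
    by_cases h : a = d
    · subst h
      simp [ih]
    · have hne : ¬ some ((d : Int)) = some ((a : Int)) := by
        simp; omega
      rw [if_neg hne, if_neg h, ih]
      simp

lemma pairsW_none (ds : List ℕ) : pairsW none ds = pairs ds := by
  cases ds with
  | nil => rfl
  | cons d t =>
    simp only [pairsW, reduceCtorEq, if_false]
    exact pairsW_some t d

lemma pairs_eq_sum (ds : List ℕ) :
    pairs ds = ((List.range (ds.length - 1)).map
      (fun k => if ds.getD k 0 = ds.getD (k + 1) 0 then (1 : Int) else 0)).sum := by
  match ds with
  | [] => simp [pairs]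
  | [a] => simp [pairs]
  | a :: b :: t =>
    have ih := pairs_eq_sum (b :: t)
    simp only [pairs, List.length_cons]
    have hlen : (t.length + 1 + 1) - 1 = (t.length + 1 - 1) + 1 := by omega
    rw [hlen, List.range_succ_eq_map]
    simp only [List.map_cons, List.sum_cons, List.map_map]
    rw [ih]
    simp only [List.getD, List.length_cons, Nat.add_sub_cancel]
    congr 1

-- characterisation of Nat.toDigits (MSB-first print form) via Nat.digits
lemma toDigitsCore_eq : ∀ (fuel m : ℕ) (ds : List Char), 0 < m → m < 10 ^ fuel →
    Nat.toDigitsCore 10 fuel m ds = ((Nat.digits 10 m).map Nat.digitChar).reverse ++ ds := by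
  intro fuel
  induction fuel with
  | zero => intro m ds hm hlt; simp at hlt; omega
  | succ fuel ih =>
    intro m ds hm hlt
    rw [Nat.toDigitsCore]
    have hdig : Nat.digits 10 m = m % 10 :: Nat.digits 10 (m / 10) :=
      Nat.digits_def' (by norm_num) hm
    by_cases h : m / 10 = 0
    · rw [if_pos h, hdig, h]
      simp
    · rw [if_neg h]
      have h1 : 0 < m / 10 := Nat.pos_of_ne_zero h
      have h2 : m / 10 < 10 ^ fuel := by
        rw [pow_succ] at hlt; omega
      rw [ih (m / 10) _ h1 h2, hdig]
      simp

lemma toDigits_length (m : ℕ) (hm : 0 < m) :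
    (Nat.toDigits 10 m).length = (Nat.digits 10 m).length := by
  rw [Nat.toDigits, toDigitsCore_eq (m + 1) m [] hm]
  · simp
  · calc m < 10 ^ m := Nat.lt_pow_self (by norm_num)
      _ ≤ 10 ^ (m + 1) := Nat.pow_le_pow_right (by norm_num) (by omega)

lemma chunk_iff (q : ℕ) : (q % 100) % 11 = 0 ↔ q % 10 = q / 10 % 10 := by
  have h1 : q % 100 = q % 10 + 10 * (q / 10 % 10) := by omega
  rw [h1]; omega

-- ===== VERDICT (by name: the statement is the Claim_ definition above) =====
theorem solution_spec : Claim_equal_solution := by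
  intro n _
  unfold Spec_solution solution solution_alt
  by_cases hn : n ≤ 0
  · rw [if_pos hn, loopA, if_neg (by omega)]
  · rw [if_neg hn]
    have hpos : 0 < n := by omega
    -- work with m := n.toNat
    obtain ⟨m, rfl⟩ : ∃ m : ℕ, n = (m : Int) := ⟨n.toNat, by omega⟩
    have hm : 0 < m := by exact_mod_cast hpos
    -- A side
    rw [loopA_digits m none 0, pairsW_none, pairs_eq_sum]
    -- B side: length of str(n)
    have hlen : PySem.Str.len (PySem.Int.toStr (m : Int)) = ((Nat.digits 10 m).length : Int) := by
      rw [PySem.Str.len_eq, PySem.Int.toList_toStr, PySem.Int.toChars]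
      rw [if_neg (by omega : ¬ (m : Int) < 0)]
      have : ((m : Int)).toNat = m := by omega
      rw [this, toDigits_length m hm]
    rw [hlen]
    set L := (Nat.digits 10 m).length with hL
    have hL1 : 1 ≤ L := by
      rw [hL]
      have hne : Nat.digits 10 m ≠ [] :=
        (Nat.digits_ne_nil_iff_ne_zero (b := 10) (n := m)).mpr (by omega)
      exact List.length_pos_of_ne_nil hne
    rw [PySem.List.pyRange_one]
    have htn : ((L : Int) - 1 - 0).toNat = L - 1 := by omega
    rw [htn, List.map_map, zero_add]
    congr 1
    apply List.map_congr_left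
    intro k hk
    simp only [Function.comp]
    have ht : ((0 : Int) + (k : Int)).toNat = k := by omega
    rw [ht]
    have hcast : ((10 : Int)) ^ k = (((10 ^ k : ℕ)) : Int) := by push_cast; ring
    rw [hcast, PySem.Int.floordiv_natCast,
      (by norm_num : (100 : Int) = ((100 : ℕ) : Int)), PySem.Int.mod_natCast,
      (by norm_num : (11 : Int) = ((11 : ℕ) : Int)), PySem.Int.mod_natCast]
    have hcond : (((m / 10 ^ k % 100 % 11 : ℕ)) : Int) = 0 ↔ (m / 10 ^ k % 100) % 11 = 0 := by
      exact_mod_cast Int.natCast_eq_zero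
    have hget1 : (Nat.digits 10 m).getD k 0 = m / 10 ^ k % 10 :=
      Nat.getD_digits m k (by norm_num)
    have hget2 : (Nat.digits 10 m).getD (k + 1) 0 = (m / 10 ^ k) / 10 % 10 := by
      rw [Nat.getD_digits m (k + 1) (by norm_num), pow_succ, ← Nat.div_div_eq_div_mul]
    rw [hget1, hget2]
    by_cases hc : (m / 10 ^ k % 100) % 11 = 0
    · rw [if_pos (hcond.mpr hc), if_pos ((chunk_iff _).mp hc)]
    · rw [if_neg (fun h => hc (hcond.mp h)), if_neg (fun h => hc ((chunk_iff _).mpr h))]
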